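-- pv_equiv track=rewrite | github.com/saptiva-ai/octavios-chat | apps/backend/src/services/memory/memory_service.py | _format_facts_for_llm
-- ===== SOURCE A (Python) =====
-- from typing import Dict, List, Optional
--
-- def _format_facts_for_llm(
--
--     facts: Dict[str, str],
--     context: Dict[str, str]
-- ) -> str:
--     """
--     Format facts nicely for LLM consumption.
--
--     Groups facts by bank.period scope and formats them
--     in a readable markdown-like structure.
--
--     Args:
--         facts: Dict of fact keys to values
--         context: Current conversation context
--
--     Returns:
--         Formatted string for LLM system message
--     """
--     # Group facts by bank.period scope
--     grouped: Dict[str, Dict[str, str]] = {}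
--     ungrouped: Dict[str, str] = {}
--
--     for key, value in facts.items():
--         parts = key.rsplit(".", 1)
--         if len(parts) == 2:
--             scope, metric = parts
--             if scope not in grouped:
--                 grouped[scope] = {}
--             grouped[scope][metric] = value
--         else:
--             ungrouped[key] = value
--
--     # Build output
--     lines = ["## Conversation Memory", ""]
--
--     # Current context section
--     if context:
--         lines.append("**Current Focus:**")
--         if context.get("bank"):
--             lines.append(f"  Bank: {context['bank'].upper()}")
--         if context.get("period"):
--             lines.append(f"  Period: {context['period']}")
--         if context.get("metric"):
--             lines.append(f"  Metric: {context['metric'].upper()}")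
--         lines.append("")
--
--     # Grouped facts by scope
--     for scope, metrics in sorted(grouped.items()):
--         scope_label = scope.replace(".", " ").replace("_", " ").upper()
--         lines.append(f"**{scope_label}:**")
--         for metric, value in sorted(metrics.items()):
--             metric_label = metric.replace("_", " ").upper()
--             lines.append(f"  {metric_label}: {value}")
--         lines.append("")
--
--     # Ungrouped facts
--     if ungrouped:
--         lines.append("**Other Facts:**")
--         for key, value in ungrouped.items():
--             lines.append(f"  {key}: {value}")
--         lines.append("")
--
--     lines.append("Use these facts to answer questions about previously mentioned numbers.")
--
--     return "\n".join(lines)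
-- ===== SOURCE B (Python) =====
-- def _format_facts_for_llm(facts, context):
--     """Same formatting, but via a flat (scope, metric, value) list: distinct scopes
--     are sorted once and each block is a filtered+sorted slice, no nested dicts."""
--     triples = []
--     ungrouped = []
--     for key, value in facts.items():
--         parts = key.rsplit(".", 1)
--         if len(parts) == 2:
--             triples.append((parts[0], parts[1], value))
--         else:
--             ungrouped.append((key, value))
--
--     lines = ["## Conversation Memory", ""]
--
--     if context:
--         lines.append("**Current Focus:**")
--         for label, ckey, up in (("Bank", "bank", True), ("Period", "period", False), ("Metric", "metric", True)):
--             v = context.get(ckey)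
--             if v:
--                 lines.append("  %s: %s" % (label, v.upper() if up else v))
--         lines.append("")
--
--     for scope in sorted({s for s, _, _ in triples}):
--         lines.append("**%s:**" % scope.replace(".", " ").replace("_", " ").upper())
--         entries = sorted(((m, v) for s, m, v in triples if s == scope), key=lambda p: p[0])
--         lines.extend("  %s: %s" % (m.replace("_", " ").upper(), v) for m, v in entries)
--         lines.append("")
--
--     if ungrouped:
--         lines.append("**Other Facts:**")
--         lines.extend("  %s: %s" % (k, v) for k, v in ungrouped)
--         lines.append("")
--
--     lines.append("Use these facts to answer questions about previously mentioned numbers.")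
--     return "\n".join(lines)
-- ===== Notes on version B (the rewrite author's own statement) =====
-- stated objective: alternative
-- what changed: Replaces A's dict-of-dicts grouping followed by per-group sorting with a single flat (scope, metric, value) list: the distinct scopes are sorted once and each markdown block is produced from a filtered, metric-sorted slice of that list; line lists are built with map/extend instead of nested append loops.
import Mathlib
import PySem

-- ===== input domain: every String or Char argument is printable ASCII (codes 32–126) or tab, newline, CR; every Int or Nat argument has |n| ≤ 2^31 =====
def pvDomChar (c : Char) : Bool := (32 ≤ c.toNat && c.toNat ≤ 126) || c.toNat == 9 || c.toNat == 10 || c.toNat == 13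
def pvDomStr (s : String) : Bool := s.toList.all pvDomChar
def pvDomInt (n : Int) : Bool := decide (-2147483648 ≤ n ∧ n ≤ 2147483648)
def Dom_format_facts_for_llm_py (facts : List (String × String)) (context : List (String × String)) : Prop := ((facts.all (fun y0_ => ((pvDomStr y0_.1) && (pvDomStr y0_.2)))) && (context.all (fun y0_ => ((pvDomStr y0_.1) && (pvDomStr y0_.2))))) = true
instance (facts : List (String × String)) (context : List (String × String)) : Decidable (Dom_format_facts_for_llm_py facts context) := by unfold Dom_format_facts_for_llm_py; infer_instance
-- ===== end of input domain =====

-- B replaces A's nested dict-of-dicts grouping by a flat triple list: distinct scopes sorted once,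
-- each block a filtered+sorted slice (objective: alternative decomposition, same asymptotic cost).

-- hand port (exact) of key.rsplit(".", 1): some (before, after) at the LAST '.', none when no '.'
def rsplitDotChars : List Char → Option (List Char × List Char)
  | [] => none
  | c :: rest =>
    match rsplitDotChars rest with
    | some (b, a) => some (c :: b, a)
    | none => if c = '.' then some ([], rest) else none

def pyRsplitDot1 (s : String) : List String :=
  match rsplitDotChars s.toList with
  | some (b, a) => [String.ofList b, String.ofList a]
  | none => [s]

-- scope.replace(".", " ").replace("_", " ").upper() / metric.replace("_", " ").upper()
def fflScopeLabel (s : String) : String :=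
  PySem.Str.upper (PySem.Str.replace (PySem.Str.replace s "." " ") "_" " ")
def fflMetricLabel (m : String) : String :=
  PySem.Str.upper (PySem.Str.replace m "_" " ")

-- ===== PORT A =====
def format_facts_for_llm_py (facts : List (String × String)) (context : List (String × String)) : String :=
  let gu := facts.foldl
    (fun (gu : PySem.Dict String (PySem.Dict String String) × PySem.Dict String String) kv =>
      match pyRsplitDot1 kv.1 with
      | [scope, metric] => (gu.1.modify scope PySem.Dict.empty (fun m => m.insert metric kv.2), gu.2)
      | _ => (gu.1, gu.2.insert kv.1 kv.2))
    (PySem.Dict.empty, PySem.Dict.empty)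
  let grouped := gu.1
  let ungrouped := gu.2
  let lines : List String := ["## Conversation Memory", ""]
  let lines := if context ≠ [] then
      let lines := lines ++ ["**Current Focus:**"]
      let lines := match (PySem.Dict.mk context).get? "bank" with
        | some v => if v ≠ "" then lines ++ ["  Bank: " ++ PySem.Str.upper v] else lines
        | none => lines
      let lines := match (PySem.Dict.mk context).get? "period" with
        | some v => if v ≠ "" then lines ++ ["  Period: " ++ v] else lines
        | none => lines
      let lines := match (PySem.Dict.mk context).get? "metric" with
        | some v => if v ≠ "" then lines ++ ["  Metric: " ++ PySem.Str.upper v] else lines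
        | none => lines
      lines ++ [""]
    else lines
  let lines := (PySem.List.sorted grouped.items (fun p => p.1) false).foldl
    (fun ls p =>
      let ls := ls ++ ["**" ++ fflScopeLabel p.1 ++ ":**"]
      let ls := (PySem.List.sorted p.2.items (fun q => q.1) false).foldl
        (fun ls q => ls ++ ["  " ++ fflMetricLabel q.1 ++ ": " ++ q.2]) ls
      ls ++ [""])
    lines
  let lines := if ungrouped.items ≠ [] then
      let lines := lines ++ ["**Other Facts:**"]
      let lines := ungrouped.items.foldl (fun ls p => ls ++ ["  " ++ p.1 ++ ": " ++ p.2]) lines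
      lines ++ [""]
    else lines
  PySem.Str.join "\n" (lines ++ ["Use these facts to answer questions about previously mentioned numbers."])

-- ===== PORT B =====
def format_facts_for_llm_py_alt (facts : List (String × String)) (context : List (String × String)) : String :=
  let tu := facts.foldl
    (fun (acc : List (String × String × String) × List (String × String)) kv =>
      let parts := pyRsplitDot1 kv.1
      if parts.length == 2 then (acc.1 ++ [(parts.getD 0 "", parts.getD 1 "", kv.2)], acc.2)
      else (acc.1, acc.2 ++ [kv]))
    ([], [])
  let triples := tu.1
  let ungrouped := tu.2
  let lines : List String := ["## Conversation Memory", ""]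
  let lines := if context ≠ [] then
      let lines := lines ++ ["**Current Focus:**"]
      let lines := [("Bank", "bank", true), ("Period", "period", false), ("Metric", "metric", true)].foldl
        (fun ls (t : String × String × Bool) =>
          match (PySem.Dict.mk context).get? t.2.1 with
          | some v => if v ≠ "" then ls ++ ["  " ++ t.1 ++ ": " ++ (if t.2.2 then PySem.Str.upper v else v)] else ls
          | none => ls)
        lines
      lines ++ [""]
    else lines
  let lines := (PySem.List.sorted (PySem.Set.ofList (triples.map (fun t => t.1))) (fun s => s) false).foldl
    (fun ls scope =>
      let ls := ls ++ ["**" ++ fflScopeLabel scope ++ ":**"]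
      let entries := PySem.List.sorted ((triples.filter (fun t => t.1 == scope)).map (fun t => t.2)) (fun p => p.1) false
      let ls := ls ++ entries.map (fun p => "  " ++ fflMetricLabel p.1 ++ ": " ++ p.2)
      ls ++ [""])
    lines
  let lines := if ungrouped ≠ [] then
      lines ++ ["**Other Facts:**"] ++ ungrouped.map (fun p => "  " ++ p.1 ++ ": " ++ p.2) ++ [""]
    else lines
  PySem.Str.join "\n" (lines ++ ["Use these facts to answer questions about previously mentioned numbers."])

-- ===== PRECONDITION & SPEC =====
-- Pre_ excludes association lists with a repeated key: A's arguments are Python dicts, which never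
-- contain duplicate keys, so such lists represent no input A is ever called on.
def Pre_format_facts_for_llm_py (facts : List (String × String)) (context : List (String × String)) : Prop :=
  (facts.map Prod.fst).Nodup ∧ (context.map Prod.fst).Nodup
instance (facts : List (String × String)) (context : List (String × String)) : Decidable (Pre_format_facts_for_llm_py facts context) := by unfold Pre_format_facts_for_llm_py; infer_instance

def pvWitness_format_facts_for_llm_py : (List (String × String)) × (List (String × String)) :=
  ([("bbva.q1", "7"), ("bbva.q2", "8"), ("note", "x")], [("bank", "bbva"), ("period", "q1")])

def Spec_format_facts_for_llm_py (facts : List (String × String)) (context : List (String × String)) (out : String) : Prop := out = format_facts_for_llm_py_alt facts context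
instance (facts : List (String × String)) (context : List (String × String)) (out : String) : Decidable (Spec_format_facts_for_llm_py facts context out) := by unfold Spec_format_facts_for_llm_py; infer_instance

-- ===== CLAIM (what is proved, stated in full; the proofs are below) =====
def Claim_equal_format_facts_for_llm_py : Prop := ∀ (facts : List (String × String)) (context : List (String × String)), Dom_format_facts_for_llm_py facts context → Pre_format_facts_for_llm_py facts context → Spec_format_facts_for_llm_py facts context (format_facts_for_llm_py facts context)

-- ===== LEMMAS AND PROOFS =====

-- kv ↦ (scope, metric, value) when the key splits, none otherwise (proof-side view of the partition)
def fflTriple (kv : String × String) : Option (String × String × String) :=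
  match rsplitDotChars kv.1.toList with
  | some (b, a) => some (String.ofList b, String.ofList a, kv.2)
  | none => none

def fflNoDot (kv : String × String) : Bool := (rsplitDotChars kv.1.toList).isNone

def fflT (facts : List (String × String)) : List (String × String × String) := facts.filterMap fflTriple

def fflU (facts : List (String × String)) : List (String × String) := facts.filter fflNoDot

def fflInner (T : List (String × String × String)) (s : String) : PySem.Dict String String :=
  (T.filter (fun t => t.1 == s)).foldl (fun m t => m.insert t.2.1 t.2.2) PySem.Dict.empty

theorem rsplit_some (cs : List Char) (b a : List Char) (h : rsplitDotChars cs = some (b, a)) :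
    cs = b ++ '.' :: a := by
  induction cs generalizing b a with
  | nil => simp [rsplitDotChars] at h
  | cons c rest ih =>
    simp only [rsplitDotChars] at h
    cases hr : rsplitDotChars rest with
    | some ba =>
      obtain ⟨b', a'⟩ := ba
      rw [hr] at h
      simp only [Option.some.injEq, Prod.mk.injEq] at h
      obtain ⟨hb, ha⟩ := h
      subst hb ha
      simp [ih b' a' hr]
    | none =>
      rw [hr] at h
      split_ifs at h with hc
      · simp only [Option.some.injEq, Prod.mk.injEq] at h
        obtain ⟨hb, ha⟩ := h
        subst hb ha hc
        simp

theorem pyRsplit_eq_some (s : String) (b a : List Char) (hr : rsplitDotChars s.toList = some (b, a)) :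
    pyRsplitDot1 s = [String.ofList b, String.ofList a] := by
  simp [pyRsplitDot1, hr]

theorem pyRsplit_eq_none (s : String) (hr : rsplitDotChars s.toList = none) :
    pyRsplitDot1 s = [s] := by
  simp [pyRsplitDot1, hr]

theorem fflT_cons_some (kv : String × String) (l : List (String × String)) (b a : List Char)
    (hr : rsplitDotChars kv.1.toList = some (b, a)) :
    fflT (kv :: l) = (String.ofList b, String.ofList a, kv.2) :: fflT l := by
  simp [fflT, fflTriple, hr]

theorem fflT_cons_none (kv : String × String) (l : List (String × String))
    (hr : rsplitDotChars kv.1.toList = none) :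
    fflT (kv :: l) = fflT l := by
  simp [fflT, fflTriple, hr]

theorem fflU_cons_some (kv : String × String) (l : List (String × String)) (b a : List Char)
    (hr : rsplitDotChars kv.1.toList = some (b, a)) :
    fflU (kv :: l) = fflU l := by
  simp [fflU, fflNoDot, hr]

theorem fflU_cons_none (kv : String × String) (l : List (String × String))
    (hr : rsplitDotChars kv.1.toList = none) :
    fflU (kv :: l) = kv :: fflU l := by
  simp [fflU, fflNoDot, hr]

theorem ffl_partB (l : List (String × String)) (acc : List (String × String × String) × List (String × String)) :
    l.foldl (fun (acc : List (String × String × String) × List (String × String)) kv =>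
      let parts := pyRsplitDot1 kv.1
      if parts.length == 2 then (acc.1 ++ [(parts.getD 0 "", parts.getD 1 "", kv.2)], acc.2)
      else (acc.1, acc.2 ++ [kv])) acc
    = (acc.1 ++ fflT l, acc.2 ++ fflU l) := by
  induction l generalizing acc with
  | nil => simp [fflT, fflU]
  | cons kv l ih =>
    rw [List.foldl_cons]
    cases hr : rsplitDotChars kv.1.toList with
    | some ba =>
      obtain ⟨b, a⟩ := ba
      rw [pyRsplit_eq_some kv.1 b a hr, fflT_cons_some kv l b a hr, fflU_cons_some kv l b a hr, ih]
      simp [List.getD]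
    | none =>
      rw [pyRsplit_eq_none kv.1 hr, fflT_cons_none kv l hr, fflU_cons_none kv l hr, ih]
      simp

theorem ffl_partA (l : List (String × String)) (acc : PySem.Dict String (PySem.Dict String String) × PySem.Dict String String) :
    l.foldl (fun (gu : PySem.Dict String (PySem.Dict String String) × PySem.Dict String String) kv =>
      match pyRsplitDot1 kv.1 with
      | [scope, metric] => (gu.1.modify scope PySem.Dict.empty (fun m => m.insert metric kv.2), gu.2)
      | _ => (gu.1, gu.2.insert kv.1 kv.2)) acc
    = ((fflT l).foldl (fun g t => g.modify t.1 PySem.Dict.empty (fun m => m.insert t.2.1 t.2.2)) acc.1,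
       (fflU l).foldl (fun u kv => u.insert kv.1 kv.2) acc.2) := by
  induction l generalizing acc with
  | nil => simp [fflT, fflU]
  | cons kv l ih =>
    rw [List.foldl_cons]
    cases hr : rsplitDotChars kv.1.toList with
    | some ba =>
      obtain ⟨b, a⟩ := ba
      rw [pyRsplit_eq_some kv.1 b a hr, fflT_cons_some kv l b a hr, fflU_cons_some kv l b a hr]
      rw [show (match [String.ofList b, String.ofList a] with
        | [scope, metric] => (acc.1.modify scope PySem.Dict.empty (fun m => m.insert metric kv.2), acc.2)
        | _ => (acc.1, acc.2.insert kv.1 kv.2))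
        = (acc.1.modify (String.ofList b) PySem.Dict.empty (fun m => m.insert (String.ofList a) kv.2), acc.2) from rfl]
      rw [ih]
      simp
    | none =>
      rw [pyRsplit_eq_none kv.1 hr, fflT_cons_none kv l hr, fflU_cons_none kv l hr]
      rw [show (match [kv.1] with
        | [scope, metric] => (acc.1.modify scope PySem.Dict.empty (fun m => m.insert metric kv.2), acc.2)
        | _ => (acc.1, acc.2.insert kv.1 kv.2)) = (acc.1, acc.2.insert kv.1 kv.2) from rfl]
      rw [ih]
      simp

theorem ffl_getD_gfold (l : List (String × String × String)) (g : PySem.Dict String (PySem.Dict String String)) (s : String) :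
    (l.foldl (fun g t => g.modify t.1 PySem.Dict.empty (fun m => m.insert t.2.1 t.2.2)) g).getD s PySem.Dict.empty
    = (l.filter (fun t => t.1 == s)).foldl (fun m t => m.insert t.2.1 t.2.2) (g.getD s PySem.Dict.empty) := by
  induction l generalizing g with
  | nil => simp
  | cons t l ih =>
    simp only [List.foldl_cons, List.filter_cons]
    by_cases h : t.1 = s
    · rw [ih, PySem.Dict.getD_modify]
      simp [h]
    · rw [ih, PySem.Dict.getD_modify, if_neg (fun hs => h hs.symm)]
      simp [h]

theorem ffl_grouped_items (T : List (String × String × String)) :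
    (T.foldl (fun g t => g.modify t.1 PySem.Dict.empty (fun m => m.insert t.2.1 t.2.2)) PySem.Dict.empty).items
    = (PySem.Set.ofList (T.map (fun t => t.1))).map (fun s => (s, fflInner T s)) := by
  have hnd := PySem.Dict.nodup_keys_foldl_modify_key T (fun t => t.1) PySem.Dict.empty
    (fun _ t => fun m => m.insert t.2.1 t.2.2) PySem.Dict.empty PySem.Dict.nodup_keys_empty
  rw [PySem.Dict.items_eq_map_keys _ hnd PySem.Dict.empty, PySem.Dict.keys_foldl_modify_key]
  simp only [PySem.Dict.keys_empty, PySem.Set.update_nil_left]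
  refine List.map_congr_left (fun s _ => ?_)
  rw [ffl_getD_gfold, PySem.Dict.getD_empty]
  rfl

theorem ffl_sorted_grouped (T : List (String × String × String)) :
    PySem.List.sorted ((PySem.Set.ofList (T.map (fun t => t.1))).map (fun s => (s, fflInner T s))) (fun p => p.1) false
    = (PySem.List.sorted (PySem.Set.ofList (T.map (fun t => t.1))) (fun s => s) false).map (fun s => (s, fflInner T s)) := by
  apply PySem.List.sorted_eq_of_perm_of_pairwise_lt
  · exact (PySem.List.sorted_perm _ _ _).map _
  · exact List.pairwise_map.mpr (PySem.List.sorted_ofList_pairwise_lt (T.map (fun t => t.1)))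

theorem ffl_metric_nodup (facts : List (String × String)) (h : (facts.map Prod.fst).Nodup) (s : String) :
    (((fflT facts).filter (fun t => t.1 == s)).map (fun t => t.2.1)).Nodup := by
  have hp : List.Pairwise (fun a b : String × String => a.1 ≠ b.1) facts :=
    List.pairwise_map.mp h
  have hT : List.Pairwise (fun t t' : String × String × String => t.1 = t'.1 → t.2.1 ≠ t'.2.1) (fflT facts) := by
    rw [fflT, List.pairwise_filterMap]
    refine hp.imp_of_mem (fun {a b} _ _ hab => ?_)
    intro t ht t' ht' h1 h2
    apply hab
    unfold fflTriple at ht ht'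
    cases hr : rsplitDotChars a.1.toList with
    | none => rw [hr] at ht; simp at ht
    | some ba =>
      cases hr' : rsplitDotChars b.1.toList with
      | none => rw [hr'] at ht'; simp at ht'
      | some ba' =>
        obtain ⟨x, y⟩ := ba; obtain ⟨x', y'⟩ := ba'
        rw [hr] at ht; rw [hr'] at ht'
        simp only [Option.some.injEq] at ht ht'
        subst ht ht'
        simp only at h1 h2
        have hx : x = x' := by
          have := congrArg String.toList h1; simpa using this
        have hy : y = y' := by
          have := congrArg String.toList h2; simpa using this
        have ha := rsplit_some _ _ _ hr
        have hb := rsplit_some _ _ _ hr'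
        apply String.toList_inj.mp
        rw [ha, hb, hx, hy]
  have hps : List.Pairwise (fun t t' : String × String × String => t.1 = t'.1 → t.2.1 ≠ t'.2.1)
      ((fflT facts).filter (fun t => t.1 == s)) :=
    hT.sublist (List.filter_sublist)
  have hps' : List.Pairwise (fun t t' : String × String × String => t.2.1 ≠ t'.2.1)
      ((fflT facts).filter (fun t => t.1 == s)) := by
    refine hps.imp_of_mem (fun {a b} ha hb hab => ?_)
    have has : a.1 = s := by simpa using (List.mem_filter.mp ha).2
    have hbs : b.1 = s := by simpa using (List.mem_filter.mp hb).2
    exact hab (has.trans hbs.symm)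
  exact List.pairwise_map.mpr hps'

theorem ffl_inner_items (facts : List (String × String)) (h : (facts.map Prod.fst).Nodup) (s : String) :
    (fflInner (fflT facts) s).items = ((fflT facts).filter (fun t => t.1 == s)).map (fun t => t.2) := by
  unfold fflInner
  have := PySem.Dict.items_foldl_insert_fresh ((fflT facts).filter (fun t => t.1 == s))
    (fun t => t.2.1) (fun t => t.2.2) PySem.Dict.empty
    (fun a _ => PySem.Dict.contains_empty _) (ffl_metric_nodup facts h s)
  simpa using this

theorem ffl_ung_items (facts : List (String × String)) (h : (facts.map Prod.fst).Nodup) :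
    ((fflU facts).foldl (fun u kv => u.insert kv.1 kv.2) (PySem.Dict.empty : PySem.Dict String String)).items
    = fflU facts := by
  have hnd : ((fflU facts).map (fun kv => kv.1)).Nodup := by
    refine List.Nodup.sublist ?_ h
    exact List.Sublist.map Prod.fst List.filter_sublist
  have := PySem.Dict.items_foldl_insert_fresh (fflU facts)
    (fun kv => kv.1) (fun kv => kv.2) PySem.Dict.empty
    (fun a _ => PySem.Dict.contains_empty _) hnd
  simpa using this

theorem ffl_renderA (X : List (String × PySem.Dict String String)) (init : List String) :
    X.foldl (fun ls p =>
      let ls := ls ++ ["**" ++ fflScopeLabel p.1 ++ ":**"]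
      let ls := (PySem.List.sorted p.2.items (fun q => q.1) false).foldl
        (fun ls q => ls ++ ["  " ++ fflMetricLabel q.1 ++ ": " ++ q.2]) ls
      ls ++ [""]) init
    = init ++ X.flatMap (fun p =>
        ("**" ++ fflScopeLabel p.1 ++ ":**") ::
        ((PySem.List.sorted p.2.items (fun q => q.1) false).map (fun q => "  " ++ fflMetricLabel q.1 ++ ": " ++ q.2) ++ [""])) := by
  simp only [PySem.List.foldl_append_singleton_eq_map]
  simp [List.append_assoc, List.flatMap]

theorem ffl_renderB (scopes : List String) (T : List (String × String × String)) (init : List String) :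
    scopes.foldl (fun ls scope =>
      let ls := ls ++ ["**" ++ fflScopeLabel scope ++ ":**"]
      let entries := PySem.List.sorted ((T.filter (fun t => t.1 == scope)).map (fun t => t.2)) (fun p => p.1) false
      let ls := ls ++ entries.map (fun p => "  " ++ fflMetricLabel p.1 ++ ": " ++ p.2)
      ls ++ [""]) init
    = init ++ scopes.flatMap (fun scope =>
        ("**" ++ fflScopeLabel scope ++ ":**") ::
        ((PySem.List.sorted ((T.filter (fun t => t.1 == scope)).map (fun t => t.2)) (fun p => p.1) false).map
          (fun p => "  " ++ fflMetricLabel p.1 ++ ": " ++ p.2) ++ [""])) := by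
  simp [List.append_assoc, List.flatMap]


theorem ffl_blocks (facts : List (String × String)) (hf : (List.map Prod.fst facts).Nodup)
    (scopes : List String) :
    scopes.flatMap (fun a =>
      ("**" ++ fflScopeLabel (a, fflInner (fflT facts) a).1 ++ ":**") ::
      (((PySem.List.sorted (a, fflInner (fflT facts) a).2.items (fun q => q.1) false).map
        (fun q => "  " ++ fflMetricLabel q.1 ++ ": " ++ q.2)) ++ [""]))
    = scopes.flatMap (fun scope =>
      ("**" ++ fflScopeLabel scope ++ ":**") ::
      (((PySem.List.sorted (((fflT facts).filter (fun t => t.1 == scope)).map (fun t => t.2)) (fun p => p.1) false).map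
        (fun p => "  " ++ fflMetricLabel p.1 ++ ": " ++ p.2)) ++ [""])) := by
  congr 1
  funext s
  rw [show ((s, fflInner (fflT facts) s).1) = s from rfl, show ((s, fflInner (fflT facts) s).2) = fflInner (fflT facts) s from rfl,
    ffl_inner_items facts hf s]

-- ===== VERDICT (by name: the statement is the Claim_ definition above) =====
theorem format_facts_for_llm_py_spec : Claim_equal_format_facts_for_llm_py := by
  intro facts context _ hpre
  obtain ⟨hf, hc⟩ := hpre
  unfold Spec_format_facts_for_llm_py format_facts_for_llm_py format_facts_for_llm_py_alt
  simp only [ffl_partA, ffl_partB, List.nil_append]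
  rw [ffl_grouped_items, ffl_sorted_grouped, ffl_renderA, ffl_renderB, List.flatMap_map, ffl_ung_items facts hf]
  rw [ffl_blocks facts hf]
  by_cases hcc : context = []
  · subst hcc
    simp only [PySem.List.foldl_append_singleton_eq_map]
    simp [List.append_assoc]
  · cases hb : (PySem.Dict.mk context).get? "bank" <;>
    cases hp : (PySem.Dict.mk context).get? "period" <;>
    cases hm : (PySem.Dict.mk context).get? "metric" <;>
    simp only [hcc, hb, hp, hm, ne_eq, not_false_eq_true, if_true, List.foldl_cons, List.foldl_nil,
      PySem.List.foldl_append_singleton_eq_map] <;>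
    split_ifs <;>
    first
      | exact absurd ‹False› not_false
      | simp [List.append_assoc]
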